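-- pv_equiv track=rewrite | github.com/wsandst/pi-visualizer | src/main.py | flip_number
-- ===== SOURCE A (Python) =====
-- def flip_number(num: list):
--     first_val_found = False
--     ret_val = []
--     for val in reversed(num):
--         if first_val_found:
--             ret_val.append(val)
--         elif val != 0:
--             ret_val.append(val)
--             first_val_found = True
--     return ret_val
-- ===== SOURCE B (Python) =====
-- def flip_number(num: list):
--     i = len(num)
--     while i > 0 and num[i - 1] == 0:
--         i -= 1
--     return num[:i][::-1]
-- ===== Notes on version B (the rewrite author's own statement) =====
-- stated objective: simpler
-- what changed: Instead of one reversed pass with a first-nonzero flag appending element by element, B locates the trailing-zero boundary by decrementing an index and returns the reversed prefix as a single slice.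
import Mathlib
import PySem

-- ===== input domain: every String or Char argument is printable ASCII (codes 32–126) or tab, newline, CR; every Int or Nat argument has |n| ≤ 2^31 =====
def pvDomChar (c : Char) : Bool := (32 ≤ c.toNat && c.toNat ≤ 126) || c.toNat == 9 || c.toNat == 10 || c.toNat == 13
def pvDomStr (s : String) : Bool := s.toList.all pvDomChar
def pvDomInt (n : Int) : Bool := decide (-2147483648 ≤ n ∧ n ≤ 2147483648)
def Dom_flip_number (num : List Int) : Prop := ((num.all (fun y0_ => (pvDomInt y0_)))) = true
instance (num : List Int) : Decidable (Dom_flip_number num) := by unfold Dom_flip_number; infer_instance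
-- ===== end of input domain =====

-- B replaces A's reversed pass with a first-nonzero flag by computing the trailing-zero boundary index, then reversing the kept prefix in one slice (objective: simpler).


-- ===== PORT A =====
-- A's loop body: state is (first_val_found, ret_val)
def pvStepA (st : Bool × List Int) (val : Int) : Bool × List Int :=
  if st.1 then (st.1, st.2 ++ [val])
  else if val ≠ 0 then (true, st.2 ++ [val])
  else st

def flip_number (num : List Int) : List Int :=
  (num.reverse.foldl pvStepA (false, [])).2

-- ===== PORT B =====
-- B's while loop: decrement i while i > 0 and num[i-1] == 0
def pvCut (num : List Int) : Nat → Nat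
  | 0 => 0
  | i + 1 => if num.getD i 0 = 0 then pvCut num i else i + 1

def flip_number_alt (num : List Int) : List Int :=
  (num.take (pvCut num num.length)).reverse

-- ===== PRECONDITION & SPEC =====
def Spec_flip_number (num : List Int) (out : List Int) : Prop := out = flip_number_alt num
instance (num : List Int) (out : List Int) : Decidable (Spec_flip_number num out) := by unfold Spec_flip_number; infer_instance

-- ===== CLAIM (what is proved, stated in full; the proofs are below) =====
def Claim_equal_flip_number : Prop := ∀ (num : List Int), Dom_flip_number num → Spec_flip_number num (flip_number num)

-- ===== LEMMAS AND PROOFS =====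
theorem pvFoldA_true (l : List Int) (acc : List Int) :
    (l.foldl pvStepA (true, acc)).2 = acc ++ l := by
  induction l generalizing acc with
  | nil => simp
  | cons x l ih => simp [pvStepA, ih]

theorem pvFoldA_false (l : List Int) :
    (l.foldl pvStepA (false, [])).2 = l.dropWhile (fun x => x == 0) := by
  induction l with
  | nil => simp
  | cons x l ih =>
    by_cases hx : x = 0
    · simpa [pvStepA, hx] using ih
    · simp [pvStepA, hx, pvFoldA_true]

theorem pvCut_le (num : List Int) (i : Nat) : pvCut num i ≤ i := by
  induction i with
  | zero => simp [pvCut]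
  | succ i ih =>
    simp only [pvCut]
    split
    · omega
    · omega

theorem pvCut_append (ys : List Int) (a : Int) (i : Nat) (h : i ≤ ys.length) :
    pvCut (ys ++ [a]) i = pvCut ys i := by
  induction i with
  | zero => rfl
  | succ i ih =>
    have hi : i < ys.length := by omega
    have hgd : (ys ++ [a]).getD i 0 = ys.getD i 0 := by
      simp [List.getD, List.getElem?_append_left hi]
    simp only [pvCut, hgd, ih (by omega)]

theorem pvAlt_eq_dropWhile (num : List Int) :
    flip_number_alt num = num.reverse.dropWhile (fun x => x == 0) := by
  induction num using List.reverseRecOn with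
  | nil => rfl
  | append_singleton ys a ih =>
    unfold flip_number_alt
    by_cases ha : a = 0
    · have hcut : pvCut (ys ++ [a]) (ys ++ [a]).length = pvCut ys ys.length := by
        simp only [List.length_append, List.length_singleton, pvCut]
        rw [List.getD, List.getElem?_append_right (by omega)]
        simpa [ha] using pvCut_append ys a ys.length le_rfl
      rw [hcut, List.take_append_of_le_length (pvCut_le ys ys.length)]
      simpa [ha] using ih
    · have hcut : pvCut (ys ++ [a]) (ys ++ [a]).length = ys.length + 1 := by
        simp only [List.length_append, List.length_singleton, pvCut]
        rw [List.getD, List.getElem?_append_right (by omega)]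
        simp [ha]
      rw [hcut]
      have : (ys ++ [a]).take (ys.length + 1) = ys ++ [a] := by
        apply List.take_of_length_le; simp
      simp [this, ha]

-- ===== VERDICT (by name: the statement is the Claim_ definition above) =====
theorem flip_number_spec : Claim_equal_flip_number := by
  intro num _
  unfold Spec_flip_number flip_number
  rw [pvFoldA_false, pvAlt_eq_dropWhile]
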